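-- pv_equiv track=rewrite | github.com/MrBrantCode/unitest_baseline | mut_generate/mist_train_taco/taco_3144/solution.py | calculate_minimum_cost
-- ===== SOURCE A (Python) =====
-- def calculate_minimum_cost(test_cases: list) -> list:
--     """
--     Calculate the minimum cost to buy all objects listed in each test case string,
--     considering the Buy 1 Get 1 discount method.
--
--     Parameters:
--     test_cases (list): A list of strings where each string represents the objects needed.
--
--     Returns:
--     list: A list of integers where each integer represents the minimum cost for the corresponding test case.
--     """
--     results = []
--
--     for s in test_cases:
--         obj_count = {}
--
--         # Count the occurrences of each object
--         for char in s:
--             if char in obj_count: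
--                 obj_count[char] += 1
--             else:
--                 obj_count[char] = 1
--
--         total_cost = 0
--
--         # Calculate the minimum cost for the current test case
--         for count in obj_count.values():
--             total_cost += (count + 1) // 2  # This handles the Buy 1 Get 1 logic
--
--         results.append(total_cost)
--
--     return results
-- ===== SOURCE B (Python) =====
-- def calculate_minimum_cost(test_cases: list) -> list:
--     # Parity-set rewrite: after toggling each char in/out of 'odd', 'odd' holds exactly
--     # the chars with an odd count; sum(ceil(c/2)) == (len(s) + len(odd)) // 2.
--     results = []
--     for s in test_cases:
--         odd = set()
--         for ch in s:
--             if ch in odd: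
--                 odd.remove(ch)
--             else:
--                 odd.add(ch)
--         results.append((len(s) + len(odd)) // 2)
--     return results
-- ===== Notes on version B (the rewrite author's own statement) =====
-- stated objective: alternative
-- what changed: Replaces the per-string frequency dictionary plus a second aggregation loop over its values with a single pass maintaining a parity set (toggle each char in/out), finishing with the closed form (len(s) + len(odd)) // 2.
import Mathlib
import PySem

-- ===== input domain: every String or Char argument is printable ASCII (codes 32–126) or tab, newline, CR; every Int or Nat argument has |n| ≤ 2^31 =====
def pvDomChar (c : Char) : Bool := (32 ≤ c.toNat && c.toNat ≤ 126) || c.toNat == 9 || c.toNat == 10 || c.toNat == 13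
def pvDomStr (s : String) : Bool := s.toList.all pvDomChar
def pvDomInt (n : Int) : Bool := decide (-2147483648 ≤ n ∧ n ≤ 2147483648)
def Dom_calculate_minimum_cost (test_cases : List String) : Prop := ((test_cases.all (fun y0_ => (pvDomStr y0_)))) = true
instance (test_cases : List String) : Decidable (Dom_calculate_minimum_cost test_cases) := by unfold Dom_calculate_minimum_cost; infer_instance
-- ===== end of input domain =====

-- B replaces A's per-string frequency dict + value-aggregation loop by one parity-set pass
-- and the closed form (len(s) + len(odd)) // 2 (objective: alternative, same cost).


-- ===== PORT A =====
def calculate_minimum_cost (test_cases : List String) : List Int :=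
  test_cases.foldl (fun results s =>
    -- count the occurrences of each object
    let obj_count : PySem.Dict Char Int :=
      s.toList.foldl (fun d char =>
        if d.contains char then d.insert char (d.getD char 0 + 1)
        else d.insert char 1) PySem.Dict.empty
    -- calculate the minimum cost for the current test case
    let total_cost : Int :=
      (PySem.Dict.values obj_count).foldl
        (fun t count => t + PySem.Int.floordiv (count + 1) 2) 0
    results ++ [total_cost]) []

-- ===== PORT B =====
def calculate_minimum_cost_alt (test_cases : List String) : List Int :=
  test_cases.foldl (fun results s =>
    -- toggle each char in/out of the parity set ('odd.remove(ch)' on a present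
    -- element is Set.discard)
    let odd : PySem.Set Char :=
      s.toList.foldl (fun o ch =>
        if o.contains ch then PySem.Set.discard o ch else PySem.Set.add o ch)
        PySem.Set.empty
    results ++ [PySem.Int.floordiv (PySem.Str.len s + PySem.Set.len odd) 2]) []

-- ===== PRECONDITION & SPEC =====
def Spec_calculate_minimum_cost (test_cases : List String) (out : List Int) : Prop := out = calculate_minimum_cost_alt test_cases
instance (test_cases : List String) (out : List Int) : Decidable (Spec_calculate_minimum_cost test_cases out) := by unfold Spec_calculate_minimum_cost; infer_instance

-- ===== CLAIM (what is proved, stated in full; the proofs are below) =====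
def Claim_equal_calculate_minimum_cost : Prop := ∀ (test_cases : List String), Dom_calculate_minimum_cost test_cases → Spec_calculate_minimum_cost test_cases (calculate_minimum_cost test_cases)

-- ===== LEMMAS AND PROOFS =====

-- A's counting loop is exactly Counter(s): the two branches collapse to one insert.
theorem countLoop_eq_counter (cs : List Char) :
    cs.foldl (fun d char =>
      if d.contains char then d.insert char (d.getD char 0 + 1)
      else d.insert char 1) PySem.Dict.empty = PySem.Dict.counter cs := by
  have hfun : (fun (d : PySem.Dict Char Int) char =>
      if d.contains char then d.insert char (d.getD char 0 + 1)
      else d.insert char 1)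
      = (fun d char => d.insert char (d.getD char 0 + 1)) := by
    funext d c
    by_cases h : d.contains c
    · simp [h]
    · simp only [Bool.not_eq_true] at h
      simp [h, PySem.Dict.getD_of_not_contains]
  rw [hfun, PySem.Dict.foldl_insert_getD_add_one_eq_counter]

-- The toggle loop's invariant: membership records the parity of the count so far.
theorem toggle_invariant (cs : List Char) : ∀ (s : PySem.Set Char), s.Nodup →
    (cs.foldl (fun o ch =>
        if o.contains ch then PySem.Set.discard o ch else PySem.Set.add o ch) s).Nodup ∧
    ∀ c, c ∈ cs.foldl (fun o ch =>
        if o.contains ch then PySem.Set.discard o ch else PySem.Set.add o ch) s ↔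
      (if c ∈ s then cs.count c % 2 = 0 else cs.count c % 2 = 1) := by
  induction cs with
  | nil =>
    intro s hs
    refine ⟨hs, fun c => ?_⟩
    by_cases h : c ∈ s <;> simp [h]
  | cons a cs ih =>
    intro s hs
    have hstep : (if s.contains a then PySem.Set.discard s a else PySem.Set.add s a).Nodup := by
      by_cases h : s.contains a = true
      · rw [if_pos h]; exact PySem.Set.nodup_discard s a hs
      · rw [if_neg h]; exact PySem.Set.nodup_add s a hs
    obtain ⟨hnd, hmem⟩ := ih _ hstep
    refine ⟨hnd, fun c => ?_⟩
    rw [List.foldl_cons, hmem c]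
    by_cases hca : c = a
    · subst hca
      by_cases h : c ∈ s
      · have hc : s.contains c = true := (PySem.Set.contains_iff s c).mpr h
        simp [hc, h, PySem.Set.mem_discard, List.count_cons]
        omega
      · have hc : s.contains c = false := by
          cases hcb : s.contains c
          · rfl
          · exact absurd ((PySem.Set.contains_iff s c).mp hcb) h
        simp [hc, h, PySem.Set.mem_add, List.count_cons]
        omega
    · have hcount : (a :: cs).count c = cs.count c := by
        simp [List.count_cons, hca, Ne.symm hca]
      rw [hcount]
      by_cases h : s.contains a
      · have ha : a ∈ s := (PySem.Set.contains_iff s a).mp h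
        simp [h, ha, PySem.Set.mem_discard, hca]
      · have ha : a ∉ s := fun hm => h ((PySem.Set.contains_iff s a).mpr hm)
        simp [h, ha, PySem.Set.mem_add, hca]

-- 2 · Σ ⌈f k / 2⌉-style halves over any list of keys.
theorem sum_half (K : List Char) (f : Char → Nat) :
    (K.map (fun k => (f k + 1) / 2)).sum * 2
      = (K.map f).sum + (K.map (fun k => f k % 2)).sum := by
  induction K with
  | nil => simp
  | cons a K ih => simp [List.map_cons, List.sum_cons, Nat.mul_comm] at ih ⊢; omega

-- membership-based length: the toggle set has as many elements as there are
-- odd-count characters among the distinct characters of cs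
theorem toggle_length (cs : List Char) :
    (cs.foldl (fun o ch =>
        if o.contains ch then PySem.Set.discard o ch else PySem.Set.add o ch)
        PySem.Set.empty).length
      = ((PySem.Set.ofList cs).filter (fun c => cs.count c % 2 == 1)).length := by
  obtain ⟨hnd, hmem⟩ := toggle_invariant cs PySem.Set.empty (by simp [PySem.Set.empty])
  have hndF : ((PySem.Set.ofList cs).filter (fun c => cs.count c % 2 == 1)).Nodup :=
    (PySem.Set.nodup_ofList cs).filter _
  refine List.Perm.length_eq ?_
  rw [List.perm_ext_iff_of_nodup hnd hndF]
  intro c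
  rw [hmem c]
  constructor
  · intro h
    simp only [PySem.Set.empty, List.not_mem_nil, if_false] at h
    have hc : c ∈ cs := by
      by_contra hn
      rw [List.count_eq_zero_of_not_mem hn] at h
      omega
    simp [List.mem_filter, PySem.Set.mem_ofList, hc, h]
  · intro h
    simp only [List.mem_filter, beq_iff_eq] at h
    simp [PySem.Set.empty, h.2]

-- per-string equality of the two bodies
theorem perString (s : String) :
    (PySem.Dict.values
        (s.toList.foldl (fun d char =>
          if d.contains char then d.insert char (d.getD char 0 + 1)
          else d.insert char 1) PySem.Dict.empty)).foldl
      (fun t count => t + PySem.Int.floordiv (count + 1) 2) 0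
    = PySem.Int.floordiv (PySem.Str.len s
        + PySem.Set.len (s.toList.foldl (fun o ch =>
            if o.contains ch then PySem.Set.discard o ch else PySem.Set.add o ch)
            PySem.Set.empty)) 2 := by
  set cs := s.toList with hcs
  set K : List Char := PySem.Set.ofList cs with hK
  -- left side: Σ over distinct chars of (count+1)/2, as a Nat cast
  rw [countLoop_eq_counter]
  have hvals : PySem.Dict.values (PySem.Dict.counter cs)
      = K.map (fun k => ((cs.count k : Nat) : Int)) := by
    show (PySem.Dict.counter cs).items.map (·.2) = _
    rw [PySem.Dict.items_counter, List.map_map]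
    rfl
  rw [hvals, PySem.List.foldl_add, List.map_map]
  have hcast : (K.map ((fun v => PySem.Int.floordiv (v + 1) 2) ∘ fun k => ((cs.count k : Nat) : Int))).sum
      = ((K.map (fun k => (cs.count k + 1) / 2)).sum : Int) := by
    have he : ∀ k : Char, PySem.Int.floordiv (((cs.count k : Nat) : Int) + 1) 2
        = (((cs.count k + 1) / 2 : Nat) : Int) := by
      intro k
      rw [show ((cs.count k : Int) + 1) = ((cs.count k + 1 : Nat) : Int) by push_cast; ring]
      exact_mod_cast PySem.Int.floordiv_natCast (cs.count k + 1) 2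
    rw [Nat.cast_list_sum, List.map_map]
    exact congrArg List.sum (List.map_congr_left fun k _ => he k)
  rw [hcast]
  -- right side: (len + #odd)/2 as a Nat cast
  have hlen : PySem.Str.len s = (cs.length : Int) := by
    simp [PySem.Str.len_eq, hcs]
  have hO := toggle_length cs
  rw [PySem.Set.len, hO, hlen]
  rw [show ((cs.length : Int) + ((K.filter (fun c => cs.count c % 2 == 1)).length : Int))
      = ((cs.length + (K.filter (fun c => cs.count c % 2 == 1)).length : Nat) : Int) by push_cast; ring]
  rw [show PySem.Int.floordiv ((cs.length + (K.filter (fun c => cs.count c % 2 == 1)).length : Nat) : Int) 2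
      = (((cs.length + (K.filter (fun c => cs.count c % 2 == 1)).length) / 2 : Nat) : Int) from
    PySem.Int.floordiv_natCast _ 2]
  -- Σ counts over the distinct chars is the length, via Finset sums
  have hKnd : K.Nodup := PySem.Set.nodup_ofList cs
  have hKfin : K.toFinset = cs.toFinset := by
    ext c; simp [List.mem_toFinset, hK, PySem.Set.mem_ofList]
  have hsum : ∀ (f : Char → Nat), (K.map f).sum = ∑ a ∈ cs.toFinset, f a := by
    intro f
    rw [← hKfin, List.sum_toFinset f hKnd]
  have hLen : (K.map (fun k => cs.count k)).sum = cs.length := by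
    rw [hsum]
    exact List.sum_toFinset_count_eq_length cs
  have hOdd : (K.filter (fun c => cs.count c % 2 == 1)).length
      = (K.map (fun k => cs.count k % 2)).sum := by
    rw [← List.countP_eq_length_filter]
    induction K with
    | nil => simp
    | cons a K ihK =>
      simp only [List.countP_cons, List.map_cons, List.sum_cons, ihK]
      by_cases h : cs.count a % 2 = 1
      · simp [h]; omega
      · simp [h]; omega
  have h2 := sum_half K (fun k => cs.count k)
  rw [hLen] at h2
  rw [hOdd]
  have hS : (K.map (fun k => (cs.count k + 1) / 2)).sum
      = (cs.length + (K.map (fun k => cs.count k % 2)).sum) / 2 := by omega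
  rw [zero_add, hS]

theorem foldl_shape (test_cases : List String) (f g : String → Int)
    (h : ∀ s, f s = g s) :
    test_cases.foldl (fun results s => results ++ [f s]) []
      = test_cases.foldl (fun results s => results ++ [g s]) [] := by
  rw [PySem.List.foldl_append_singleton_eq_map, PySem.List.foldl_append_singleton_eq_map]
  simp [List.map_congr_left fun s _ => h s]

-- ===== VERDICT (by name: the statement is the Claim_ definition above) =====
theorem calculate_minimum_cost_spec : Claim_equal_calculate_minimum_cost := by
  intro test_cases _
  show calculate_minimum_cost test_cases = calculate_minimum_cost_alt test_cases
  unfold calculate_minimum_cost calculate_minimum_cost_alt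
  exact foldl_shape test_cases _ _ perString
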